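-- pv_equiv track=rewrite | github.com/StampyAI/alignment-research-dataset | align_data/embeddings/text_splitter.py | heading_at_position
-- ===== SOURCE A (Python) =====
-- from typing import List, Tuple, Dict, NamedTuple
--
-- def heading_at_position(headings: List[Tuple[int, int, str]], pos: int) -> str | None:
--     """Get the heading context at a given position.
--
--     Returns heading hierarchy like "Methods > Data Collection" or None.
--     """
--     stack = []  # [(level, text), ...]
--
--     for h_pos, level, text in headings:
--         if h_pos > pos:
--             break
--         # Pop any headings at same or deeper level
--         while stack and stack[-1][0] >= level:
--             stack.pop()
--         stack.append((level, text))
--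
--     if not stack:
--         return None
--
--     return " > ".join(text for _, text in stack)
-- ===== SOURCE B (Python) =====
-- def heading_at_position(headings, pos):
--     """Get the heading context at a given position.
--
--     Returns heading hierarchy like "Methods > Data Collection" or None.
--     """
--     # eligible prefix: stop at the first heading positioned after pos
--     prefix = []
--     for h in headings:
--         if h[0] > pos:
--             break
--         prefix.append(h)
--     # backward pass: keep each heading strictly shallower than any kept so far
--     texts = []
--     min_level = None
--     for _h_pos, level, text in reversed(prefix):
--         if min_level is None or level < min_level:
--             texts.append(text)
--             min_level = level
--     if not texts:
--         return None
--     return " > ".join(reversed(texts))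
-- ===== Notes on version B (the rewrite author's own statement) =====
-- stated objective: alternative
-- what changed: Replaces the forward stack with pop-while maintenance by a single backward pass over the eligible prefix that keeps a running minimum level and collects each heading strictly shallower than all later kept ones.
import Mathlib
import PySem

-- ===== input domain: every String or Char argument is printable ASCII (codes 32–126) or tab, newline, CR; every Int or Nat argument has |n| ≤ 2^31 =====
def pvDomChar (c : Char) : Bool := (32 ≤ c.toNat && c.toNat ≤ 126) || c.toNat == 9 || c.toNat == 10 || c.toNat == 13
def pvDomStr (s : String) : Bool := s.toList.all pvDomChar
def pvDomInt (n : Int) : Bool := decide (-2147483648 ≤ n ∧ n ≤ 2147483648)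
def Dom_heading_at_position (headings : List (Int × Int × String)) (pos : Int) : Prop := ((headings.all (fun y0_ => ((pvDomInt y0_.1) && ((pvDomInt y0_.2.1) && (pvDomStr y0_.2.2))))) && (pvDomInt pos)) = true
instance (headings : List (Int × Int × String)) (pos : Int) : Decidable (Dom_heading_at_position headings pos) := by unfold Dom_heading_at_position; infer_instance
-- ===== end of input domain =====

-- B rebuilds the same hierarchy by a backward pass over the eligible prefix with a
-- running minimum level, instead of A's forward stack with pop-while maintenance.

-- ===== PORT A =====
-- A's stack is represented top-first (head = stack top), so Python's
-- `while stack and stack[-1][0] >= level: stack.pop()` is a dropWhile from the head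
-- and `stack.append` is a cons; the final join therefore reverses the stack first.
def haLoopA : List (Int × Int × String) → Int → List (Int × String) → List (Int × String)
  | [], _, st => st
  | (h, l, t) :: rest, pos, st =>
    if h > pos then st
    else haLoopA rest pos ((l, t) :: st.dropWhile (fun p => decide (l ≤ p.1)))

def heading_at_position (headings : List (Int × Int × String)) (pos : Int) : Option String :=
  let st := haLoopA headings pos []
  if st = [] then none
  else some (PySem.Str.join " > " (st.reverse.map Prod.snd))

-- ===== PORT B =====
-- state: (collected texts in collection order, running minimum level so far)
def hbStep (acc : List String × Option Int) (h : Int × Int × String) : List String × Option Int :=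
  match acc.2 with
  | none => (acc.1 ++ [h.2.2], some h.2.1)
  | some ml => if h.2.1 < ml then (acc.1 ++ [h.2.2], some h.2.1) else acc

def heading_at_position_alt (headings : List (Int × Int × String)) (pos : Int) : Option String :=
  let pre := headings.takeWhile (fun h => decide (h.1 ≤ pos))
  let res := pre.reverse.foldl hbStep ([], none)
  if res.1 = [] then none
  else some (PySem.Str.join " > " res.1.reverse)

-- ===== PRECONDITION & SPEC =====
def Spec_heading_at_position (headings : List (Int × Int × String)) (pos : Int) (out : Option String) : Prop := out = heading_at_position_alt headings pos
instance (headings : List (Int × Int × String)) (pos : Int) (out : Option String) : Decidable (Spec_heading_at_position headings pos out) := by unfold Spec_heading_at_position; infer_instance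

-- ===== CLAIM (what is proved, stated in full; the proofs are below) =====
def Claim_equal_heading_at_position : Prop := ∀ (headings : List (Int × Int × String)) (pos : Int), Dom_heading_at_position headings pos → Spec_heading_at_position headings pos (heading_at_position headings pos)

-- ===== LEMMAS AND PROOFS =====

-- A's loop step, as a fold function
def haStep (st : List (Int × String)) (h : Int × Int × String) : List (Int × String) :=
  (h.2.1, h.2.2) :: st.dropWhile (fun p => decide (h.2.1 ≤ p.1))

-- A's break-loop equals a fold over the takeWhile prefix
theorem haLoopA_eq_foldl (headings : List (Int × Int × String)) (pos : Int) (st : List (Int × String)) :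
    haLoopA headings pos st = (headings.takeWhile (fun h => decide (h.1 ≤ pos))).foldl haStep st := by
  induction headings generalizing st with
  | nil => simp [haLoopA]
  | cons h rest ih =>
    obtain ⟨hp, l, t⟩ := h
    by_cases hgt : hp > pos
    · simp [haLoopA, hgt, List.takeWhile, show ¬ hp ≤ pos by omega]
    · simp [haLoopA, hgt, List.takeWhile, show hp ≤ pos by omega, ih, haStep]

-- dropping levels ≥ a and then levels ≥ b (with b ≤ a) is the same as dropping levels ≥ b
theorem dropWhile_dropWhile_le (S : List (Int × String)) (a b : Int) (hba : b ≤ a) :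
    (S.dropWhile (fun p => decide (a ≤ p.1))).dropWhile (fun p => decide (b ≤ p.1))
      = S.dropWhile (fun p => decide (b ≤ p.1)) := by
  induction S with
  | nil => simp
  | cons x S ih =>
    by_cases hax : a ≤ x.1
    · simp [List.dropWhile, hax, show b ≤ x.1 by omega, ih]
    · simp [List.dropWhile, hax]

-- core invariant: the backward scan with current minimum lv collects exactly the texts
-- of the part of A's stack strictly below level lv
theorem hb_collect (Q : List (Int × Int × String)) (ts : List String) (lv : Int) :
    (Q.reverse.foldl hbStep (ts, some lv)).1
      = ts ++ ((Q.foldl haStep []).dropWhile (fun p => decide (lv ≤ p.1))).map Prod.snd := by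
  induction Q using List.reverseRecOn generalizing ts lv with
  | nil => simp
  | append_singleton R y ih =>
    obtain ⟨hp, l, t⟩ := y
    by_cases hlt : l < lv
    · simp only [List.reverse_append, List.reverse_cons, List.reverse_nil, List.nil_append,
        List.foldl_cons, List.foldl_append, hbStep, List.foldl_nil, hlt, ite_true, ite_false]
      rw [ih]
      simp [haStep, List.dropWhile, show ¬ lv ≤ l by omega]
    · simp only [List.reverse_append, List.reverse_cons, List.reverse_nil, List.nil_append,
        List.foldl_cons, List.foldl_append, hbStep, List.foldl_nil, hlt, ite_true, ite_false]
      rw [ih]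
      simp [haStep, show lv ≤ l by omega,
        dropWhile_dropWhile_le _ l lv (by omega)]

-- the full backward scan collects the texts of A's stack (top-first order)
theorem hb_collect_none (P : List (Int × Int × String)) :
    (P.reverse.foldl hbStep ([], none)).1 = (P.foldl haStep []).map Prod.snd := by
  induction P using List.reverseRecOn with
  | nil => simp
  | append_singleton R y _ =>
    obtain ⟨hp, l, t⟩ := y
    simp only [List.reverse_append, List.reverse_cons, List.reverse_nil, List.nil_append,
      List.foldl_cons, List.foldl_append, List.foldl_nil, hbStep]
    rw [hb_collect]
    simp [haStep]

-- ===== VERDICT (by name: the statement is the Claim_ definition above) =====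
theorem heading_at_position_spec : Claim_equal_heading_at_position := by
  intro headings pos _
  unfold Spec_heading_at_position
  simp only [heading_at_position, heading_at_position_alt, haLoopA_eq_foldl, hb_collect_none]
  set st := (headings.takeWhile (fun h => decide (h.1 ≤ pos))).foldl haStep []
  by_cases hst : st = []
  · simp [hst]
  · simp [hst, List.map_eq_nil_iff, List.map_reverse]
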